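-- pv_equiv track=rewrite | github.com/unitealfa/DMS | produit-cor/component/tokenisation-layout.py | _merge_close_columns
-- ===== SOURCE A (Python) =====
-- def _merge_close_columns(centers, row_cells, merge_dist: int):
--     i = 0
--     while i < len(centers) - 1:
--         if (centers[i+1] - centers[i]) <= merge_dist:
--             both = 0
--             alone_next = 0
--             for r in row_cells:
--                 hi = i in r
--                 hj = (i+1) in r
--                 if hj and hi:
--                     both += 1
--                 elif hj and not hi:
--                     alone_next += 1
--             if both >= 1 and alone_next <= max(1, int(0.2 * (both + alone_next))):
--                 for r in row_cells:
--                     if (i+1) in r: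
--                         t2, sp2 = r.pop(i+1)
--                         if i in r:
--                             t1, sp1 = r[i]
--                             r[i] = ((t1 + "  " + t2).strip(), sp1 + sp2)
--                         else:
--                             r[i] = (t2, sp2)
--
--                 centers.pop(i+1)
--
--                 for r in row_cells:
--                     ks = sorted([k for k in r.keys() if k > i+1])
--                     for k in ks:
--                         r[k-1] = r.pop(k)
--                 continue
--         i += 1
--     return centers, row_cells
-- ===== SOURCE B (Python) =====
-- # B: two phases instead of A's interleaved mutate-and-recount loop. Phase 1 walks the
-- # columns ONCE, never touching the row dicts: it keeps the first center of the group
-- # being accumulated and, per row, one boolean 'does this row touch the accumulated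
-- # group', from which both/alone_next are counted; it emits the kept centers and the
-- # chronological list of absorb positions. Phase 2 then rebuilds each row once,
-- # folding the recorded absorbs over it. Note: B rebuilds fresh row dicts (A mutates
-- # the dicts in place); the lists `centers` and `row_cells` are mutated in place and
-- # returned — the stated equivalence is about the returned value.
--
-- def _absorb_at(r, i):
--     a, b = r.get(i), r.get(i + 1)
--     cell = a if b is None else (b if a is None else ((a[0] + "  " + b[0]).strip(), a[1] + b[1]))
--     head = [(k, cell if k == i else v) for k, v in r.items() if k <= i]
--     if a is None and b is not None:
--         head.append((i, cell))
--     tail = sorted(((k - 1, v) for k, v in r.items() if k > i + 1), key=lambda kv: kv[0])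
--     return dict(head + tail)
--
--
-- def _merge_close_columns(centers, row_cells, merge_dist: int):
--     keysets = [set(r) for r in row_cells]
--     firsts = []                      # kept (first) center of each completed group
--     events = []                      # chronological absorb positions (final column index)
--     cur = None                       # first center of the group being accumulated
--     has = [False] * len(row_cells)   # per row: does it touch the accumulated group?
--     for j, c in enumerate(centers):
--         if cur is not None and c - cur <= merge_dist:
--             both = sum(1 for h, ks in zip(has, keysets) if h and j in ks)
--             alone = sum(1 for h, ks in zip(has, keysets) if not h and j in ks)
--             if both >= 1 and alone <= max(1, (both + alone) // 5):
--                 events.append(len(firsts))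
--                 has = [h or (j in ks) for h, ks in zip(has, keysets)]
--                 continue
--         if cur is not None:
--             firsts.append(cur)
--         cur = c
--         has = [j in ks for ks in keysets]
--     if cur is not None:
--         firsts.append(cur)
--     centers[:] = firsts
--     for idx, r in enumerate(row_cells):
--         d = dict(r)
--         for i in events:
--             d = _absorb_at(d, i)
--         row_cells[idx] = d
--     return centers, row_cells
-- ===== Notes on version B (the rewrite author's own statement) =====
-- stated objective: alternative
-- what changed: B replaces A's interleaved mutate-and-recount while-loop by two one-way passes: phase 1 walks the columns once without ever touching the row dicts, keeping one accumulated-membership boolean per row (computed from immutable per-row key sets) to evaluate the both/alone_next criterion, and records the kept centers and the chronological absorb positions; phase 2 then rebuilds each row dict once by folding the recorded absorbs over it, instead of A's per-merge pop/in-place-write plus sorted pop/reinsert renumbering passes over every row; …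
import Mathlib
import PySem

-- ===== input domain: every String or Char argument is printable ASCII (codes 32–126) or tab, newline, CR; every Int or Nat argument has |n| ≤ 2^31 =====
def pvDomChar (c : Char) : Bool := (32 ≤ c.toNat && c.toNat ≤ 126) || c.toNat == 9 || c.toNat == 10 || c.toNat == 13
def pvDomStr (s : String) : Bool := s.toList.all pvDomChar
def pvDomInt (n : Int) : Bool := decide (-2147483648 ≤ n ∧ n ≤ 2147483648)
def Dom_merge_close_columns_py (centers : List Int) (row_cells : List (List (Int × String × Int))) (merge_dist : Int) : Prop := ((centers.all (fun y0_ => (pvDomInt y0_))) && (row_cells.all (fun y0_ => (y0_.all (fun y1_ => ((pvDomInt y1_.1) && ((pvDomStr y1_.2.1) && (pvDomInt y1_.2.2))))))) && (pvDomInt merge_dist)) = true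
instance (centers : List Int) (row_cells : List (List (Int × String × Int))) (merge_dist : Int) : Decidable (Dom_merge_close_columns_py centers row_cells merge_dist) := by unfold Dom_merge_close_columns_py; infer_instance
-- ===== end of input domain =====

-- B splits A's interleaved mutate-and-recount loop into two one-way passes: a decision
-- pass over immutable per-row key sets with one accumulated-membership boolean per row,
-- then one batched rebuild per row folding the recorded absorbs; equal return value
-- (B builds fresh row dicts where A mutates them in place — the equivalence is about
-- the returned value).

-- ===== PORT A =====

-- a row of the table: a Python dict {column index: (text, span)}
abbrev PvRow := PySem.Dict Int (String × Int)

-- (t1 + "  " + t2).strip() with the span sum: string work on List Char via PySem.Chars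
-- (exact; Lean's own String.append is kernel-opaque, so the concatenation is done on toList)
def pvCombineCell (x y : String × Int) : String × Int :=
  (String.ofList (PySem.Chars.strip (x.1.toList ++ ' ' :: ' ' :: y.1.toList)), x.2 + y.2)

-- int(0.2 * n) for the n used here (a count of rows, so 0 ≤ n < 2^52): the double 0.2 is
-- 0x1.999999999999Ap-3, about 2.8e-17 above 1/5, so 0.2*n truncates to n // 5 exactly until
-- the excess n*2.8e-17 can reach the next integer, i.e. for every n below ~2^52.
def pvIntOfPointTwo (n : Int) : Int := PySem.Int.floordiv n 5

-- the first 'for r in row_cells' of the merge branch: t2, sp2 = r.pop(i+1); write r[i]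
def pvMergeRowA (i : Nat) (r : PvRow) : PvRow :=
  match r.pop? ((i : Int) + 1) with
  | none => r                                  -- '(i+1) in r' is false: row untouched here
  | some (v2, r') =>
    match r'.get? (i : Int) with               -- 'if i in r:' (after the pop)
    | some v1 => r'.insert (i : Int) (pvCombineCell v1 v2)
    | none => r'.insert (i : Int) v2

-- r[k-1] = r.pop(k)
def pvRenumStep (r : PvRow) (k : Int) : PvRow :=
  match r.pop? k with
  | some (v, r') => r'.insert (k - 1) v
  | none => r

-- the second 'for r in row_cells': ks = sorted([k for k in r.keys() if k > i+1]); the fold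
def pvRenumRowA (i : Nat) (r : PvRow) : PvRow :=
  (PySem.List.sorted (r.keys.filter (fun k => decide ((i : Int) + 1 < k))) id).foldl pvRenumStep r

-- termination measures for the while loop (cited by name in 'decreasing_by')
theorem pv_dec_merge {centers : List Int} {i : Nat} (h : i + 1 < centers.length) :
    (centers.eraseIdx (i+1)).length - i < centers.length - i := by
  have := List.length_eraseIdx_of_lt (l := centers) (i := i+1) h
  omega

theorem pv_dec_skip {centers : List Int} {i : Nat} (h : i + 1 < centers.length) :
    centers.length - (i+1) < centers.length - i := by
  omega

-- the while loop, on the loop variable i; termination: each branch shrinks len(centers) - i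
def pvLoopA (merge_dist : Int) (centers : List Int) (rows : List PvRow) (i : Nat) :
    List Int × List PvRow :=
  if h : i + 1 < centers.length then                          -- while i < len(centers) - 1
    if centers.getD (i+1) 0 - centers.getD i 0 ≤ merge_dist then  -- centers[i+1], centers[i]: in range by the guard
      let ba := rows.foldl (fun (p : Int × Int) r =>
        let hi := r.contains (i : Int)
        let hj := r.contains ((i : Int) + 1)
        if hj && hi then (p.1 + 1, p.2)
        else if hj && !hi then (p.1, p.2 + 1)
        else p) (0, 0)
      if 1 ≤ ba.1 ∧ ba.2 ≤ max 1 (pvIntOfPointTwo (ba.1 + ba.2)) then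
        -- merge: rewrite rows, centers.pop(i+1) (in range), renumber rows, continue at i
        pvLoopA merge_dist (centers.eraseIdx (i+1)) ((rows.map (pvMergeRowA i)).map (pvRenumRowA i)) i
      else pvLoopA merge_dist centers rows (i+1)
    else pvLoopA merge_dist centers rows (i+1)
  else (centers, rows)
termination_by centers.length - i
decreasing_by
  · exact pv_dec_merge h
  · exact pv_dec_skip h
  · exact pv_dec_skip h

def merge_close_columns_py (centers : List Int) (row_cells : List (List (Int × String × Int))) (merge_dist : Int) : List Int × (List (List (Int × String × Int))) :=
  -- each row arrives as the association list of a Python dict: materialise the dict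
  let rows := row_cells.map PySem.Dict.ofList
  let res := pvLoopA merge_dist centers rows 0
  (res.1, res.2.map PySem.Dict.items)

-- ===== PORT B =====

-- _absorb_at(r, i): one-pass rebuild of a row after one absorb at final column i
def pvMergedRowB (i : Nat) (r : PvRow) : PvRow :=
  let a := r.get? (i : Int)
  let b := r.get? ((i : Int) + 1)
  let cell : Option (String × Int) :=
    match a, b with
    | _, none => a
    | none, some y => some y
    | some x, some y => some (pvCombineCell x y)
  -- head = [(k, cell if k == i else v) for k, v in r.items() if k <= i]
  -- (cell is never None when key i occurs; Option.getD supplies the unused default)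
  let head := (r.items.filter (fun p => decide (p.1 ≤ (i : Int)))).map
      (fun p => if p.1 = (i : Int) then ((i : Int), cell.getD p.2) else p)
  -- if a is None and b is not None: head.append((i, cell))
  let head := if a.isNone && b.isSome then head ++ [((i : Int), cell.getD ("", 0))] else head
  -- tail = sorted(((k-1, v) for k, v in r.items() if k > i+1), key=kv[0])
  let tail := PySem.List.sorted ((r.items.filter (fun p => decide ((i : Int) + 1 < p.1))).map
      (fun p => (p.1 - 1, p.2))) (fun p => p.1)
  PySem.Dict.ofList (head ++ tail)                            -- dict(head + tail)

-- phase 2 inner loop: 'for i in events: d = _absorb_at(d, i)'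
def pvApplyEvents (events : List Nat) (r : PvRow) : PvRow :=
  events.foldl (fun d i => pvMergedRowB i d) r

-- (both + alone) // 5
def pvDiv5 (n : Int) : Int := PySem.Int.floordiv n 5

-- both = sum(1 for h, ks in zip(has, keysets) if h and j in ks)
def pvBothCount (has : List Bool) (keysets : List (List Int)) (j : Int) : Int :=
  ((has.zip keysets).countP (fun p => p.1 && p.2.contains j) : Int)

-- alone = sum(1 for h, ks in zip(has, keysets) if not h and j in ks)
def pvAloneCount (has : List Bool) (keysets : List (List Int)) (j : Int) : Int :=
  ((has.zip keysets).countP (fun p => !p.1 && p.2.contains j) : Int)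

-- phase 1, one step of 'for j, c in enumerate(centers)': state (firsts, events, cur, has)
def pvStepB (md : Int) (keysets : List (List Int))
    (st : List Int × List Nat × Option Int × List Bool) (jc : Int × Int) :
    List Int × List Nat × Option Int × List Bool :=
  match st.2.2.1 with
  | some cf =>
    if jc.2 - cf ≤ md then
      if 1 ≤ pvBothCount st.2.2.2 keysets jc.1 ∧
          pvAloneCount st.2.2.2 keysets jc.1 ≤
            max 1 (pvDiv5 (pvBothCount st.2.2.2 keysets jc.1 + pvAloneCount st.2.2.2 keysets jc.1)) then
        (st.1, st.2.1 ++ [st.1.length], some cf,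
         List.zipWith (fun h ks => h || ks.contains jc.1) st.2.2.2 keysets)
      else (st.1 ++ [cf], st.2.1, some jc.2, keysets.map (fun ks => ks.contains jc.1))
    else (st.1 ++ [cf], st.2.1, some jc.2, keysets.map (fun ks => ks.contains jc.1))
  | none => (st.1, st.2.1, some jc.2, keysets.map (fun ks => ks.contains jc.1))

def merge_close_columns_py_alt (centers : List Int) (row_cells : List (List (Int × String × Int))) (merge_dist : Int) : List Int × (List (List (Int × String × Int))) :=
  let rows := row_cells.map PySem.Dict.ofList
  let keysets := rows.map PySem.Dict.keys          -- keysets = [set(r) for r in row_cells]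
  let st := (PySem.List.enumerate centers).foldl (pvStepB merge_dist keysets)
      ([], [], none, row_cells.map (fun _ => false))
  let firsts := st.1 ++ (match st.2.2.1 with | some cf => [cf] | none => [])
  (firsts, rows.map (fun r => (pvApplyEvents st.2.1 r).items))

-- ===== PRECONDITION & SPEC =====
def Spec_merge_close_columns_py (centers : List Int) (row_cells : List (List (Int × String × Int))) (merge_dist : Int) (out : List Int × (List (List (Int × String × Int)))) : Prop := out = merge_close_columns_py_alt centers row_cells merge_dist
instance (centers : List Int) (row_cells : List (List (Int × String × Int))) (merge_dist : Int) (out : List Int × (List (List (Int × String × Int)))) : Decidable (Spec_merge_close_columns_py centers row_cells merge_dist out) := by unfold Spec_merge_close_columns_py; infer_instance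

-- ===== CLAIM (what is proved, stated in full; the proofs are below) =====
def Claim_equal_merge_close_columns_py : Prop := ∀ (centers : List Int) (row_cells : List (List (Int × String × Int))) (merge_dist : Int), Dom_merge_close_columns_py centers row_cells merge_dist → Spec_merge_close_columns_py centers row_cells merge_dist (merge_close_columns_py centers row_cells merge_dist)

-- ===== LEMMAS AND PROOFS =====

theorem pvApplyEvents_append (E : List Nat) (i : Nat) (r : PvRow) :
    pvApplyEvents (E ++ [i]) r = pvMergedRowB i (pvApplyEvents E r) := by
  simp [pvApplyEvents]

theorem pv_mergedRowB_nodup (i : Nat) (r : PvRow) : (pvMergedRowB i r).keys.Nodup := by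
  unfold pvMergedRowB
  exact PySem.Dict.nodup_keys_ofList _

theorem pvApplyEvents_nodup (E : List Nat) (r : PvRow) (h : r.keys.Nodup) :
    (pvApplyEvents E r).keys.Nodup := by
  induction E generalizing r with
  | nil => exact h
  | cons e E ih =>
    show (List.foldl (fun d i => pvMergedRowB i d) r (e :: E)).keys.Nodup
    rw [List.foldl_cons]
    exact ih _ (pv_mergedRowB_nodup e r)

theorem pv_keys_contains (r : PvRow) (k : Int) : r.keys.contains k = r.contains k := by
  rw [PySem.Dict.contains_eq_decide_mem_keys]
  simp

theorem pv_mem_keys_ofList (l : List (Int × (String × Int))) (k : Int) :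
    (PySem.Dict.ofList l).contains k = decide (k ∈ l.map Prod.fst) := by
  rw [PySem.Dict.contains_eq_decide_mem_keys]
  simp only [decide_eq_decide]
  have h : (PySem.Dict.ofList l : PvRow) = l.foldl (fun d x => d.insert x.1 x.2) PySem.Dict.empty := rfl
  rw [h]
  rw [PySem.Dict.keys_foldl_insert_key l Prod.fst (fun _ x => x.2) PySem.Dict.empty]
  rw [PySem.Dict.keys_empty, PySem.Set.update_nil_left]
  exact PySem.Set.mem_ofList _ _

-- how one absorb at column i renumbers a row's key set
theorem pv_containsB (i : Nat) (r : PvRow) (k : Int) :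
    (pvMergedRowB i r).contains k =
      (if k < (i : Int) then r.contains k
       else if k = (i : Int) then (r.contains (i : Int) || r.contains ((i : Int) + 1))
       else r.contains (k + 1)) := by
  set I : Int := (i : Int) with hI
  have hmemiff : ∀ (x : Int), r.contains x = true ↔ x ∈ r.items.map Prod.fst := by
    intro x
    rw [PySem.Dict.contains_eq_decide_mem_keys]
    simp only [decide_eq_true_eq]
    rfl
  have hconts : (pvMergedRowB i r).contains k
      = decide ((k ≤ I ∧ k ∈ r.items.map Prod.fst)
          ∨ ((r.contains I = false ∧ r.contains (I+1) = true) ∧ k = I)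
          ∨ (∃ p ∈ r.items, I + 1 < p.1 ∧ p.1 - 1 = k)) := by
    unfold pvMergedRowB
    rw [pv_mem_keys_ofList]
    simp only [decide_eq_decide, ← hI]
    constructor
    · intro h
      simp only [List.map_append, List.mem_append] at h
      rcases h with h | h
      · by_cases hap : (r.get? I).isNone && (r.get? (I+1)).isSome
        · rw [if_pos hap] at h
          simp only [List.map_append, List.mem_append] at h
          rcases h with h | h
          · rcases List.mem_map.mp h with ⟨p, hp, rfl⟩
            rcases List.mem_map.mp hp with ⟨q, hq, rfl⟩
            rcases List.mem_filter.mp hq with ⟨hq1, hq2⟩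
            left
            by_cases hqi : q.1 = I
            · refine ⟨by simp [hqi], ?_⟩
              rw [if_pos hqi]
              show I ∈ List.map Prod.fst r.items
              exact hqi ▸ List.mem_map.mpr ⟨q, hq1, rfl⟩
            · rw [if_neg hqi]
              exact ⟨by simpa using hq2, List.mem_map.mpr ⟨q, hq1, rfl⟩⟩
          · simp only [List.map_cons, List.map_nil, List.mem_singleton] at h
            right; left
            simp only [Bool.and_eq_true, Option.isNone_iff_eq_none] at hap
            refine ⟨⟨?_, ?_⟩, h⟩
            · rw [PySem.Dict.contains_eq_isSome_get?, hap.1]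
              rfl
            · rw [PySem.Dict.contains_eq_isSome_get?, hap.2]
        · rw [if_neg hap] at h
          rcases List.mem_map.mp h with ⟨p, hp, rfl⟩
          rcases List.mem_map.mp hp with ⟨q, hq, rfl⟩
          rcases List.mem_filter.mp hq with ⟨hq1, hq2⟩
          left
          by_cases hqi : q.1 = I
          · refine ⟨by simp [hqi], ?_⟩
            rw [if_pos hqi]
            show I ∈ List.map Prod.fst r.items
            exact hqi ▸ List.mem_map.mpr ⟨q, hq1, rfl⟩
          · rw [if_neg hqi]
            exact ⟨by simpa using hq2, List.mem_map.mpr ⟨q, hq1, rfl⟩⟩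
      · rcases List.mem_map.mp h with ⟨p, hp, rfl⟩
        rw [PySem.List.mem_sorted] at hp
        rcases List.mem_map.mp hp with ⟨q, hq, rfl⟩
        rcases List.mem_filter.mp hq with ⟨hq1, hq2⟩
        right; right
        exact ⟨q, hq1, by simpa using hq2, rfl⟩
    · intro h
      simp only [List.map_append, List.mem_append]
      rcases h with ⟨hk, hmem⟩ | ⟨⟨hno, hyes⟩, rfl⟩ | ⟨p, hp, hgt, rfl⟩
      · left
        rcases List.mem_map.mp hmem with ⟨q, hq, rfl⟩
        have hmemf : q ∈ r.items.filter (fun p => decide (p.1 ≤ I)) :=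
          List.mem_filter.mpr ⟨hq, by simpa using hk⟩
        by_cases hap : (r.get? I).isNone && (r.get? (I+1)).isSome
        · rw [if_pos hap]
          simp only [List.map_append, List.mem_append]
          left
          refine List.mem_map.mpr ⟨_, List.mem_map.mpr ⟨q, hmemf, rfl⟩, ?_⟩
          by_cases hqi : q.1 = I <;> simp [hqi]
        · rw [if_neg hap]
          refine List.mem_map.mpr ⟨_, List.mem_map.mpr ⟨q, hmemf, rfl⟩, ?_⟩
          by_cases hqi : q.1 = I <;> simp [hqi]
      · left
        rw [PySem.Dict.contains_eq_isSome_get?] at hno hyes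
        have hap : ((r.get? I).isNone && (r.get? (I+1)).isSome) = true := by
          rw [Bool.and_eq_true]
          exact ⟨by cases hg : PySem.Dict.get? r I <;> simp_all, hyes⟩
        rw [if_pos hap]
        simp
      · right
        refine List.mem_map.mpr ⟨(p.1 - 1, p.2), ?_, rfl⟩
        rw [PySem.List.mem_sorted]
        exact List.mem_map.mpr ⟨p, List.mem_filter.mpr ⟨hp, by simpa using hgt⟩, rfl⟩
  rw [hconts]
  by_cases h1 : k < I
  · rw [if_pos h1]
    rw [show r.contains k = decide (k ∈ r.items.map Prod.fst) from by
      rw [PySem.Dict.contains_eq_decide_mem_keys]; rfl]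
    simp only [decide_eq_decide]
    constructor
    · rintro (⟨-, h⟩ | ⟨-, rfl⟩ | ⟨p, hp, hgt, rfl⟩)
      · exact h
      · omega
      · omega
    · intro h
      exact Or.inl ⟨by omega, h⟩
  · rw [if_neg h1]
    by_cases h2 : k = I
    · rw [if_pos h2]
      subst h2
      rcases hcI : r.contains I with _ | _
      · rcases hcI1 : r.contains (I+1) with _ | _
        · simp only [Bool.or_self]
          rw [decide_eq_false_iff_not]
          rintro (⟨-, h⟩ | ⟨⟨-, h⟩, -⟩ | ⟨p, hp, hgt, hpk⟩)
          · have := (hmemiff I).mpr h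
            simp [hcI] at this
          · exact absurd h (by simp)
          · omega
        · simp only [Bool.false_or]
          rw [decide_eq_true_eq]
          refine Or.inr (Or.inl ⟨⟨?_, ?_⟩, ?_⟩) <;> simp
      · simp only [Bool.true_or]
        rw [decide_eq_true_eq]
        exact Or.inl ⟨le_refl _, (hmemiff I).mp hcI⟩
    · rw [if_neg h2]
      rw [show r.contains (k+1) = decide ((k+1) ∈ r.items.map Prod.fst) from by
        rw [PySem.Dict.contains_eq_decide_mem_keys]; rfl]
      simp only [decide_eq_decide]
      constructor
      · rintro (⟨hk, -⟩ | ⟨-, rfl⟩ | ⟨p, hp, hgt, hpk⟩)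
        · omega
        · omega
        · rw [show k + 1 = p.1 from by omega]
          exact List.mem_map.mpr ⟨p, hp, rfl⟩
      · intro h
        rcases List.mem_map.mp h with ⟨q, hq, hq1⟩
        exact Or.inr (Or.inr ⟨q, hq, by omega, by omega⟩)

theorem pv_countP_split {a : Type} (p q : a → Bool) (l : List a) :
    l.countP q = l.countP (fun x => p x && q x) + l.countP (fun x => !p x && q x) := by
  induction l with
  | nil => simp
  | cons x l ih =>
    by_cases hp : p x <;> by_cases hq : q x <;>
      simp [List.countP_cons, hp, hq, ih] <;> omega

theorem pv_zipWith_self {a b : Type} (f : a → a → b) (l : List a) :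
    List.zipWith f l l = l.map (fun x => f x x) := by
  induction l with
  | nil => rfl
  | cons x l ih => simp [ih]

theorem pv_eraseIdx_mid (G : List Int) (cf cn : Int) (l : List Int) :
    (G ++ cf :: cn :: l).eraseIdx (G.length + 1) = G ++ cf :: l := by
  induction G with
  | nil => rfl
  | cons g G ih => simpa using ih

theorem pv_getD_at (G : List Int) (cf : Int) (l : List Int) :
    (G ++ cf :: l).getD G.length 0 = cf := by
  induction G with
  | nil => rfl
  | cons g G ih => simpa using ih

theorem pv_getD_at1 (G : List Int) (cf cn : Int) (l : List Int) :
    (G ++ cf :: cn :: l).getD (G.length + 1) 0 = cn := by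
  induction G with
  | nil => rfl
  | cons g G ih => simpa using ih

-- the two counters of A's counting loop, in filter/countP form
theorem pv_count_loop (i : Nat) (rows : List PvRow) (b0 a0 : Int) :
    rows.foldl (fun (p : Int × Int) r =>
        let hi := r.contains (i : Int)
        let hj := r.contains ((i : Int) + 1)
        if hj && hi then (p.1 + 1, p.2)
        else if hj && !hi then (p.1, p.2 + 1)
        else p) (b0, a0) =
      (b0 + ((rows.filter (fun r => r.contains ((i : Int) + 1))).countP
          (fun r => r.contains (i : Int)) : Int),
       a0 + (((rows.filter (fun r => r.contains ((i : Int) + 1))).length : Int)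
          - ((rows.filter (fun r => r.contains ((i : Int) + 1))).countP
              (fun r => r.contains (i : Int)) : Int))) := by
  induction rows generalizing b0 a0 with
  | nil => simp
  | cons r rows ih =>
    simp only [List.foldl_cons, List.filter_cons]
    by_cases hj : r.contains ((i:Int)+1) <;> by_cases hi : r.contains (i:Int) <;>
      simp only [hj, hi, Bool.and_true, Bool.and_false, Bool.not_true, Bool.not_false,
        if_true, if_false, ite_true, ite_false, ih] <;>
      simp [Prod.ext_iff, List.countP_cons, hj, hi] <;> push_cast <;> omega

-- items of a dict built from a duplicate-free association list
theorem pv_ofList_items (l : List (Int × (String × Int))) (h : (l.map Prod.fst).Nodup) :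
    (PySem.Dict.ofList l).items = l := by
  have := PySem.Dict.items_foldl_insert_fresh l Prod.fst Prod.snd PySem.Dict.empty
      (by intro a _; simp [PySem.Dict.empty, PySem.Dict.contains]) h
  simpa [PySem.Dict.ofList, PySem.Dict.update, PySem.Dict.empty] using this

-- a strictly key-sorted permutation is THE sorted list
theorem pv_sorted_strict {a : Type} (xs ys : List a) (key : a → Int)
    (hperm : ys.Perm xs) (hnd : (ys.map key).Nodup)
    (hpw : ys.Pairwise (fun p q => key p ≤ key q)) :
    PySem.List.sorted xs key = ys := by
  apply PySem.List.sorted_eq_of_perm_of_pairwise_lt xs ys key hperm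
  have hne : ys.Pairwise (fun p q => key p ≠ key q) := by
    exact (List.pairwise_map.mp hnd)
  exact (hpw.and hne).imp (fun h => lt_of_le_of_ne h.1 h.2)

-- the renumbering fold, one moved entry at a time
theorem pv_fold_renum (ps : List (Int × (String × Int))) (d : PvRow)
    (hnd : d.keys.Nodup)
    (hmem : ∀ p ∈ ps, p ∈ d.items)
    (hpair : ps.Pairwise (fun p q => p.1 < q.1))
    (hfresh : ∀ p ∈ ps, (p.1 - 1) ∉ d.keys ∨ (p.1 - 1) ∈ ps.map Prod.fst) :
    (ps.map Prod.fst).foldl pvRenumStep d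
      = PySem.Dict.mk ((d.items.filter (fun q => decide (q.1 ∉ ps.map Prod.fst)))
          ++ ps.map (fun p => (p.1 - 1, p.2))) := by
  induction ps generalizing d with
  | nil => simp
  | cons p rest ih =>
    have hrestgt : ∀ q ∈ rest, p.1 < q.1 := (List.pairwise_cons.mp hpair).1
    have hp : p ∈ d.items := hmem p (List.mem_cons_self ..)
    have hget : d.get? p.1 = some p.2 :=
      PySem.Dict.get?_of_mem_items d (by exact hp) hnd
    have hfkeys : (p.1 - 1) ∉ d.keys := by
      rcases hfresh p (List.mem_cons_self ..) with h | h
      · exact h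
      · exfalso
        rcases List.mem_map.mp h with ⟨q, hq, hq1⟩
        rcases List.mem_cons.mp hq with rfl | hq'
        · omega
        · have := hrestgt q hq'; omega
    have hcont : ((d.erase p.1).contains (p.1 - 1)) = false := by
      simp only [PySem.Dict.erase, PySem.Dict.contains, List.any_eq_false] at *
      intro q hq
      simp only [List.mem_filter] at hq
      intro hbeq
      have hq1 : q.1 = p.1 - 1 := beq_iff_eq.mp hbeq
      exact hfkeys (by
        simp only [PySem.Dict.keys, List.mem_map]
        exact ⟨q, hq.1, hq1⟩)
    have hstep : pvRenumStep d p.1 = (d.erase p.1).insert (p.1 - 1) p.2 := by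
      simp [pvRenumStep, PySem.Dict.pop?, hget]
    have hitems1 : ((d.erase p.1).insert (p.1 - 1) p.2).items
        = d.items.filter (fun q => !(q.1 == p.1)) ++ [(p.1 - 1, p.2)] := by
      rw [PySem.Dict.items_insert_of_not_contains _ _ hcont]
      rfl
    set d1 := (d.erase p.1).insert (p.1 - 1) p.2 with hd1
    have hkeys1 : d1.keys = (d.items.filter (fun q => !(q.1 == p.1))).map Prod.fst ++ [p.1 - 1] := by
      simp [PySem.Dict.keys, hitems1]
    have hsubkeys : ∀ k, k ∈ (d.items.filter (fun q => !(q.1 == p.1))).map Prod.fst → k ∈ d.keys ∧ k ≠ p.1 := by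
      intro k hk
      rcases List.mem_map.mp hk with ⟨q, hq, rfl⟩
      rcases List.mem_filter.mp hq with ⟨hq1, hq2⟩
      exact ⟨List.mem_map.mpr ⟨q, hq1, rfl⟩, by simpa using hq2⟩
    have hnd1 : d1.keys.Nodup := by
      rw [hkeys1]
      apply List.Nodup.append
      · exact hnd.sublist (List.Sublist.map _ List.filter_sublist)
      · exact List.nodup_singleton _
      · intro k hk hk'
        rcases hsubkeys k hk with ⟨hmemk, -⟩
        simp only [List.mem_singleton] at hk'
        exact hfkeys (hk' ▸ hmemk)
    have hmem' : ∀ q ∈ rest, q ∈ d1.items := by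
      intro q hq
      rw [hitems1]
      apply List.mem_append_left
      refine List.mem_filter.mpr ⟨hmem q (List.mem_cons_of_mem _ hq), ?_⟩
      have := hrestgt q hq
      simp only [Bool.not_eq_eq_eq_not, Bool.not_true, beq_eq_false_iff_ne, ne_eq]
      omega
    have hpair' : rest.Pairwise (fun p q => p.1 < q.1) := (List.pairwise_cons.mp hpair).2
    have hfresh' : ∀ q ∈ rest, (q.1 - 1) ∉ d1.keys ∨ (q.1 - 1) ∈ rest.map Prod.fst := by
      intro q hq
      have hqgt := hrestgt q hq
      rcases hfresh q (List.mem_cons_of_mem _ hq) with h | h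
      · left
        rw [hkeys1]
        intro hmem2
        rcases List.mem_append.mp hmem2 with h2 | h2
        · exact h (hsubkeys _ h2).1
        · simp only [List.mem_singleton] at h2
          omega
      · rcases List.mem_map.mp h with ⟨w, hw, hw1⟩
        rcases List.mem_cons.mp hw with rfl | hw'
        · left
          rw [hkeys1]
          intro hmem2
          rcases List.mem_append.mp hmem2 with h2 | h2
          · exact absurd (hw1 ▸ (hsubkeys _ h2).2) (by simp)
          · simp only [List.mem_singleton] at h2
            omega
        · right
          exact List.mem_map.mpr ⟨w, hw', hw1⟩
    rw [List.map_cons, List.foldl_cons, hstep, ih d1 hnd1 hmem' hpair' hfresh']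
    congr 1
    rw [hitems1, List.filter_append, List.filter_filter]
    have h2 : (List.filter (fun q => decide (q.1 ∉ rest.map Prod.fst)) [((p.1 - 1 : Int), p.2)])
        = [(p.1 - 1, p.2)] := by
      simp only [List.filter_cons, List.filter_nil, decide_eq_true_eq]
      rw [if_pos]
      intro hmem2
      rcases List.mem_map.mp hmem2 with ⟨w, hw, hw1⟩
      have := hrestgt w hw
      omega
    have h3 : d.items.filter (fun q => decide (q.1 ∉ rest.map Prod.fst) && !(q.1 == p.1))
        = d.items.filter (fun q => decide (q.1 ∉ (p :: rest).map Prod.fst)) := by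
      apply List.filter_congr
      intro q _
      by_cases h : q.1 = p.1 <;> by_cases h' : q.1 ∈ rest.map Prod.fst <;> simp [h, h']
    rw [h2, h3, List.map_cons]
    simp

-- A's renumbering pass, characterised: entries at or left of i stay (in order), entries
-- right of i+1 end up at the back, shifted down one and key-sorted
theorem pv_renum (i : Nat) (d : PvRow) (hnd : d.keys.Nodup)
    (hno : ((i : Int) + 1) ∉ d.keys) :
    pvRenumRowA i d = PySem.Dict.mk
      ((d.items.filter (fun p => decide (p.1 ≤ (i : Int)))) ++
       ((PySem.List.sorted (d.items.filter (fun p => decide ((i : Int) + 1 < p.1)))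
          (fun p => p.1)).map (fun p => (p.1 - 1, p.2)))) := by
  set I : Int := (i : Int) with hI
  set ps := PySem.List.sorted (d.items.filter (fun p => decide (I + 1 < p.1))) (fun p => p.1)
    with hps
  have hperm : ps.Perm (d.items.filter (fun p => decide (I + 1 < p.1))) :=
    PySem.List.sorted_perm _ _ _
  have hndf : ((d.items.filter (fun p => decide (I + 1 < p.1))).map Prod.fst).Nodup :=
    hnd.sublist (List.Sublist.map _ List.filter_sublist)
  have hndps : (ps.map Prod.fst).Nodup := (hperm.map Prod.fst).nodup_iff.mpr hndf
  have hpairle : ps.Pairwise (fun p q => p.1 ≤ q.1) := PySem.List.sorted_pairwise _ _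
  have hpair : ps.Pairwise (fun p q => p.1 < q.1) := by
    have hne : ps.Pairwise (fun a b => a.1 ≠ b.1) := List.pairwise_map.mp hndps
    exact (hpairle.and hne).imp (fun h => lt_of_le_of_ne h.1 h.2)
  have hmemf : ∀ q ∈ ps, q ∈ d.items ∧ I + 1 < q.1 := by
    intro q hq
    have := hperm.mem_iff.mp hq
    rcases List.mem_filter.mp this with ⟨h1, h2⟩
    exact ⟨h1, by simpa using h2⟩
  have hkeyiff : ∀ k, k ∈ ps.map Prod.fst ↔ (k ∈ d.keys ∧ I + 1 < k) := by
    intro k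
    rw [List.mem_map]
    constructor
    · rintro ⟨q, hq, rfl⟩
      rcases hmemf q hq with ⟨h1, h2⟩
      exact ⟨List.mem_map.mpr ⟨q, h1, rfl⟩, h2⟩
    · rintro ⟨hk, hgt⟩
      rcases List.mem_map.mp hk with ⟨q, hq, rfl⟩
      refine ⟨q, ?_, rfl⟩
      exact hperm.mem_iff.mpr (List.mem_filter.mpr ⟨hq, by simpa using hgt⟩)
  have hks : PySem.List.sorted (d.keys.filter (fun k => decide (I + 1 < k))) id
      = ps.map Prod.fst := by
    apply pv_sorted_strict
    · refine (hperm.map Prod.fst).trans ?_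
      rw [show d.keys = d.items.map Prod.fst from rfl, List.filter_map]
      rfl
    · simpa using hndps
    · exact List.pairwise_map.mpr (hpairle.imp (fun h => h))
  have hfold := pv_fold_renum ps d hnd (fun q hq => (hmemf q hq).1) hpair ?fresh
  case fresh =>
    intro q hq
    rcases hmemf q hq with ⟨-, hgt⟩
    by_cases hk : (q.1 - 1) ∈ d.keys
    · right
      rw [hkeyiff]
      refine ⟨hk, ?_⟩
      rcases (lt_or_eq_of_le (by omega : I + 1 ≤ q.1 - 1)) with h | h
      · exact h
      · exact absurd (h ▸ hk) hno
    · exact Or.inl hk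
  rw [pvRenumRowA, ← hI, hks, hfold]
  congr 1
  apply congrArg (· ++ List.map (fun p => (p.1 - 1, p.2)) ps)
  apply List.filter_congr
  intro q hq
  have : q.1 ∈ ps.map Prod.fst ↔ I + 1 < q.1 := by
    rw [hkeyiff]
    constructor
    · exact fun h => h.2
    · exact fun h => ⟨List.mem_map.mpr ⟨q, hq, rfl⟩, h⟩
  have hne : q.1 ≠ I + 1 := by
    intro h
    exact hno (h ▸ List.mem_map.mpr ⟨q, hq, rfl⟩)
  simp only [decide_eq_decide, this]
  omega

theorem pv_mk_eq_ofList (l : List (Int × (String × Int))) (h : (l.map Prod.fst).Nodup) :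
    PySem.Dict.ofList l = PySem.Dict.mk l := by
  apply PySem.Dict.ext
  rw [pv_ofList_items l h]

-- decrementing every key commutes with key-sorting (keys distinct)
theorem pv_sorted_dec (l : List (Int × (String × Int))) (h : (l.map Prod.fst).Nodup) :
    PySem.List.sorted (l.map (fun p => (p.1 - 1, p.2))) (fun p => p.1)
      = (PySem.List.sorted l (fun p => p.1)).map (fun p => (p.1 - 1, p.2)) := by
  have hperm : (PySem.List.sorted l (fun p => (p.1 : Int))).Perm l := PySem.List.sorted_perm _ _ _
  apply pv_sorted_strict
  · exact hperm.map _
  · have : ((PySem.List.sorted l (fun p => (p.1 : Int))).map Prod.fst).Nodup :=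
      (hperm.map Prod.fst).nodup_iff.mpr h
    have h2 : ((PySem.List.sorted l (fun p => (p.1 : Int))).map (fun p => (p.1 - 1, p.2))).map Prod.fst
        = ((PySem.List.sorted l (fun p => (p.1 : Int))).map Prod.fst).map (fun k => k - 1) := by
      simp [List.map_map, Function.comp]
    rw [h2]
    exact this.map (fun a b => by omega)
  · refine List.pairwise_map.mpr ?_
    refine (PySem.List.sorted_pairwise _ _).imp ?_
    intro a b hab
    simpa using by omega

-- keys of 'kept entries ++ shifted sorted tail' are distinct
theorem pv_parts_nodup (i : Nat) (d : PvRow) (hnd : d.keys.Nodup) :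
    (((d.items.filter (fun p => decide (p.1 ≤ (i : Int)))) ++
      ((PySem.List.sorted (d.items.filter (fun p => decide ((i : Int) + 1 < p.1)))
        (fun p => p.1)).map (fun p : Int × String × Int => (p.1 - 1, p.2)))).map Prod.fst).Nodup := by
  rw [List.map_append]
  apply List.Nodup.append
  · exact hnd.sublist (List.Sublist.map _ List.filter_sublist)
  · have hperm : (PySem.List.sorted (d.items.filter (fun p => decide ((i : Int) + 1 < p.1)))
        (fun p => (p.1 : Int))).Perm _ := PySem.List.sorted_perm _ _ _
    have hndf : ((d.items.filter (fun p => decide ((i : Int) + 1 < p.1))).map Prod.fst).Nodup :=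
      hnd.sublist (List.Sublist.map _ List.filter_sublist)
    have h2 : ((PySem.List.sorted (d.items.filter (fun p => decide ((i : Int) + 1 < p.1)))
          (fun p => (p.1 : Int))).map (fun p => (p.1 - 1, p.2))).map Prod.fst
        = ((PySem.List.sorted (d.items.filter (fun p => decide ((i : Int) + 1 < p.1)))
          (fun p => (p.1 : Int))).map Prod.fst).map (fun k => k - 1) := by
      simp [List.map_map, Function.comp]
    rw [h2]
    exact (((hperm.map Prod.fst).nodup_iff.mpr hndf).map (fun a b => by omega))
  · intro k hk hk'
    rcases List.mem_map.mp hk with ⟨q, hq, rfl⟩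
    have hqle : q.1 ≤ (i : Int) := by simpa using (List.mem_filter.mp hq).2
    rcases List.mem_map.mp hk' with ⟨w, hw, hw1⟩
    rcases List.mem_map.mp hw with ⟨w0, hw0, rfl⟩
    have : ((i : Int) + 1) < w0.1 := by
      have := (PySem.List.sorted_perm _ _ _ |>.mem_iff.mp hw0 : w0 ∈ _)
      simpa using (List.mem_filter.mp this).2
    have : w0.1 - 1 = q.1 := by simpa using hw1
    omega

theorem pv_filter_le_of_ne (I : Int) (l : List (Int × String × Int)) :
    (l.filter (fun p => !(p.1 == I + 1))).filter (fun p => decide (p.1 ≤ I))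
      = l.filter (fun p => decide (p.1 ≤ I)) := by
  rw [List.filter_filter]
  apply List.filter_congr
  intro q _
  by_cases h : q.1 ≤ I <;> simp [h] <;> omega

theorem pv_filter_gt_of_ne (I : Int) (l : List (Int × String × Int)) :
    (l.filter (fun p => !(p.1 == I + 1))).filter (fun p => decide (I + 1 < p.1))
      = l.filter (fun p => decide (I + 1 < p.1)) := by
  rw [List.filter_filter]
  apply List.filter_congr
  intro q _
  by_cases h : I + 1 < q.1 <;> simp [h] <;> omega

-- one absorb, row by row: A's pop/write then renumber equals B's one-pass rebuild
theorem pv_row_step (i : Nat) (r : PvRow) (hnd : r.keys.Nodup) :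
    pvRenumRowA i (pvMergeRowA i r) = pvMergedRowB i r := by
  set I : Int := (i : Int) with hI
  have hfmem : ∀ q ∈ r.items, q.1 ∈ r.keys := fun q hq => List.mem_map.mpr ⟨q, hq, rfl⟩
  cases hb : r.get? (I + 1) with
  | none =>
    have hno : (I + 1) ∉ r.keys := (PySem.Dict.get?_eq_none_iff_not_mem_keys r _).mp hb
    have hA : pvMergeRowA i r = r := by
      simp [pvMergeRowA, PySem.Dict.pop?, ← hI, hb]
    rw [hA, pv_renum i r hnd hno, ← hI]
    have hhead : (r.items.filter (fun p => decide (p.1 ≤ I))).map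
        (fun p => if p.1 = I then (I, (r.get? I).getD p.2) else p)
        = r.items.filter (fun p => decide (p.1 ≤ I)) := by
      have := List.map_congr_left (l := r.items.filter (fun p => decide (p.1 ≤ I)))
        (f := fun p => if p.1 = I then (I, (r.get? I).getD p.2) else p) (g := id) ?_
      · simpa using this
      · intro p hp
        by_cases h : p.1 = I
        · have hmem : ((p.1, p.2) : Int × String × Int) ∈ r.items := by
            simpa using List.mem_of_mem_filter hp
          have hg : r.get? p.1 = some p.2 := PySem.Dict.get?_of_mem_items r hmem hnd
          show (if p.1 = I then (I, (PySem.Dict.get? r I).getD p.2) else p) = id p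
          rw [if_pos h, ← h, hg]
          simp
        · simp [h]
    have hndf : ((r.items.filter (fun p => decide (I + 1 < p.1))).map Prod.fst).Nodup :=
      hnd.sublist (List.Sublist.map _ List.filter_sublist)
    simp only [pvMergedRowB, ← hI, hb, Option.isSome_none, Bool.and_false, if_false]
    rw [hhead, pv_sorted_dec _ hndf, pv_mk_eq_ofList _ (by exact pv_parts_nodup i r hnd)]
    rw [if_neg (by simp)]
  | some y =>
    have hEitems : (r.erase (I + 1)).items = r.items.filter (fun p => !(p.1 == I + 1)) := rfl
    have hEkeys : (r.erase (I + 1)).keys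
        = (r.items.filter (fun p => !(p.1 == I + 1))).map Prod.fst := rfl
    have hndE : (r.erase (I + 1)).keys.Nodup :=
      hnd.sublist (List.Sublist.map _ List.filter_sublist)
    have hnoE : (I + 1) ∉ (r.erase (I + 1)).keys := by
      rw [hEkeys]
      intro h
      rcases List.mem_map.mp h with ⟨q, hq, hq1⟩
      have := (List.mem_filter.mp hq).2
      simp [hq1] at this
    cases ha : r.get? I with
    | none =>
      have hnoI : I ∉ r.keys := (PySem.Dict.get?_eq_none_iff_not_mem_keys r _).mp ha
      have hnoIE : I ∉ (r.erase (I + 1)).keys := by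
        rw [hEkeys]
        intro h
        rcases List.mem_map.mp h with ⟨q, hq, hq1⟩
        exact hnoI (hq1 ▸ hfmem q (List.mem_of_mem_filter hq))
      have hgE : (r.erase (I + 1)).get? I = none :=
        (PySem.Dict.get?_eq_none_iff_not_mem_keys _ _).mpr hnoIE
      have hcE : (r.erase (I + 1)).contains I = false := by
        rw [PySem.Dict.contains_eq_decide_mem_keys]
        simpa using hnoIE
      have hA : pvMergeRowA i r = (r.erase (I + 1)).insert I y := by
        simp only [pvMergeRowA, PySem.Dict.pop?, ← hI, hb, Option.map_some]
        rw [hgE]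
      have hd1items : ((r.erase (I + 1)).insert I y).items
          = r.items.filter (fun p => !(p.1 == I + 1)) ++ [(I, y)] := by
        rw [PySem.Dict.items_insert_of_not_contains _ _ hcE, hEitems]
      have hnd1 : ((r.erase (I + 1)).insert I y).keys.Nodup := by
        show (((r.erase (I + 1)).insert I y).items.map Prod.fst).Nodup
        rw [hd1items, List.map_append]
        apply List.Nodup.append
        · exact hnd.sublist (List.Sublist.map _ List.filter_sublist)
        · exact List.nodup_singleton _
        · intro k hk hk'
          simp only [List.map_cons, List.map_nil, List.mem_singleton] at hk'
          subst hk'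
          rcases List.mem_map.mp hk with ⟨q, hq, hq1⟩
          exact hnoI (hq1 ▸ hfmem q (List.mem_of_mem_filter hq))
      have hno1 : (I + 1) ∉ ((r.erase (I + 1)).insert I y).keys := by
        show (I + 1) ∉ ((r.erase (I + 1)).insert I y).items.map Prod.fst
        rw [hd1items, List.map_append]
        intro h
        rcases List.mem_append.mp h with h | h
        · exact hnoE h
        · simp at h
      rw [hA, pv_renum i _ hnd1 hno1, ← hI, hd1items]
      rw [List.filter_append, List.filter_append, pv_filter_le_of_ne, pv_filter_gt_of_ne]
      have hle : List.filter (fun p => decide (p.1 ≤ I)) [(I, y)] = [(I, y)] := by simp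
      have hgt : List.filter (fun p => decide (I + 1 < p.1)) [(I, y)] = ([] : List (Int × String × Int)) := by
        simp
      rw [hle, hgt, List.append_nil]
      have hhead : (r.items.filter (fun p => decide (p.1 ≤ I))).map
          (fun p => if p.1 = I then (I, y) else p)
          = r.items.filter (fun p => decide (p.1 ≤ I)) := by
        have := List.map_congr_left (l := r.items.filter (fun p => decide (p.1 ≤ I)))
          (f := fun p => if p.1 = I then (I, y) else p) (g := id) ?_
        · simpa using this
        · intro p hp
          by_cases h : p.1 = I
          · exfalso
            exact hnoI (h ▸ hfmem p (List.mem_of_mem_filter hp))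
          · simp [h]
      have hndf : ((r.items.filter (fun p => decide (I + 1 < p.1))).map Prod.fst).Nodup :=
        hnd.sublist (List.Sublist.map _ List.filter_sublist)
      simp only [pvMergedRowB, ← hI, ha, hb, Option.isSome_some, Option.isNone_none,
        Bool.true_and, if_true, Option.getD_some]
      rw [hhead, pv_sorted_dec _ hndf]
      have hndparts : ((List.filter (fun p => decide (p.1 ≤ I)) r.items ++
          ([(I, y)] ++
            List.map (fun p : Int × String × Int => (p.1 - 1, p.2))
              (PySem.List.sorted (List.filter (fun p => decide (I + 1 < p.1)) r.items)
                (fun p => p.1)))).map Prod.fst).Nodup := by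
        simp only [List.map_append]
        apply List.Nodup.append
        · exact hnd.sublist (List.Sublist.map _ List.filter_sublist)
        · apply List.Nodup.append
          · exact List.nodup_singleton _
          · have hperm : (PySem.List.sorted (r.items.filter (fun p => decide (I + 1 < p.1)))
                (fun p => (p.1 : Int))).Perm _ := PySem.List.sorted_perm _ _ _
            have h2 : ((PySem.List.sorted (r.items.filter (fun p => decide (I + 1 < p.1)))
                  (fun p => (p.1 : Int))).map (fun p : Int × String × Int => (p.1 - 1, p.2))).map Prod.fst
                = ((PySem.List.sorted (r.items.filter (fun p => decide (I + 1 < p.1)))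
                  (fun p => (p.1 : Int))).map Prod.fst).map (fun k => k - 1) := by
              simp [List.map_map, Function.comp]
            rw [h2]
            exact (((hperm.map Prod.fst).nodup_iff.mpr hndf).map (fun a b => by omega))
          · intro k hk hk'
            simp only [List.map_cons, List.map_nil, List.mem_singleton] at hk
            subst hk
            rcases List.mem_map.mp hk' with ⟨w, hw, hw1⟩
            rcases List.mem_map.mp hw with ⟨w0, hw0, rfl⟩
            have hmemw : w0 ∈ r.items.filter (fun p => decide (I + 1 < p.1)) :=
              (PySem.List.sorted_perm _ _ _).mem_iff.mp hw0
            have : I + 1 < w0.1 := by simpa using (List.mem_filter.mp hmemw).2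
            have : w0.1 - 1 = I := by simpa using hw1
            omega
        · intro k hk hk'
          rcases List.mem_map.mp hk with ⟨q, hq, rfl⟩
          have hqle : q.1 ≤ I := by simpa using (List.mem_filter.mp hq).2
          rcases List.mem_append.mp hk' with h | h
          · simp only [List.map_cons, List.map_nil, List.mem_singleton] at h
            exact hnoI (h ▸ hfmem q (List.mem_of_mem_filter hq))
          · rcases List.mem_map.mp h with ⟨w, hw, hw1⟩
            rcases List.mem_map.mp hw with ⟨w0, hw0, rfl⟩
            have hmemw : w0 ∈ r.items.filter (fun p => decide (I + 1 < p.1)) :=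
              (PySem.List.sorted_perm _ _ _).mem_iff.mp hw0
            have : I + 1 < w0.1 := by simpa using (List.mem_filter.mp hmemw).2
            have : w0.1 - 1 = q.1 := by simpa using hw1
            omega
      rw [← List.append_assoc] at hndparts
      rw [pv_mk_eq_ofList _ hndparts]
    | some x =>
      have hmemIx : ((I, x) : Int × String × Int) ∈ r.items :=
        PySem.Dict.mem_items_of_get?_eq_some r ha
      have hmemE : ((I, x) : Int × String × Int) ∈ (r.erase (I + 1)).items := by
        rw [hEitems]
        refine List.mem_filter.mpr ⟨hmemIx, by simp⟩
      have hgE : (r.erase (I + 1)).get? I = some x :=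
        PySem.Dict.get?_of_mem_items _ hmemE hndE
      have hcE : (r.erase (I + 1)).contains I = true := by
        rw [PySem.Dict.contains_eq_decide_mem_keys]
        have : I ∈ (r.erase (I + 1)).keys :=
          List.mem_map.mpr ⟨(I, x), hmemE, rfl⟩
        simpa using this
      have hA : pvMergeRowA i r = (r.erase (I + 1)).insert I (pvCombineCell x y) := by
        simp only [pvMergeRowA, PySem.Dict.pop?, ← hI, hb, Option.map_some]
        rw [hgE]
      have hd1items : ((r.erase (I + 1)).insert I (pvCombineCell x y)).items
          = (r.items.filter (fun p => !(p.1 == I + 1))).map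
              (fun p => if p.1 == I then (I, pvCombineCell x y) else p) := by
        rw [PySem.Dict.items_insert_of_contains _ _ hcE, hEitems]
      have hkey : ∀ p : Int × String × Int,
          ((if p.1 == I then (I, pvCombineCell x y) else p) : Int × String × Int).1 = p.1 := by
        intro p
        by_cases h : p.1 = I <;> simp [h]
      have hkeys1 : ((r.erase (I + 1)).insert I (pvCombineCell x y)).keys
          = (r.erase (I + 1)).keys := by
        show ((r.erase (I + 1)).insert I (pvCombineCell x y)).items.map Prod.fst = _
        rw [hd1items, List.map_map, hEkeys]
        exact List.map_congr_left (fun p _ => hkey p)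
      have hnd1 : ((r.erase (I + 1)).insert I (pvCombineCell x y)).keys.Nodup := by
        rw [hkeys1]; exact hndE
      have hno1 : (I + 1) ∉ ((r.erase (I + 1)).insert I (pvCombineCell x y)).keys := by
        rw [hkeys1]; exact hnoE
      rw [hA, pv_renum i _ hnd1 hno1, ← hI, hd1items]
      have hfle : ((r.items.filter (fun p => !(p.1 == I + 1))).map
            (fun p => if p.1 == I then (I, pvCombineCell x y) else p)).filter
              (fun p => decide (p.1 ≤ I))
          = (r.items.filter (fun p => decide (p.1 ≤ I))).map
              (fun p => if p.1 == I then (I, pvCombineCell x y) else p) := by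
        rw [List.filter_map]
        congr 1
        rw [show (((fun p : Int × String × Int => decide (p.1 ≤ I)) ∘
              (fun p => if p.1 == I then (I, pvCombineCell x y) else p))
            = fun p : Int × String × Int => decide (p.1 ≤ I)) from ?_, pv_filter_le_of_ne]
        funext p
        simp only [Function.comp_apply, hkey p]
      have hfgt : ((r.items.filter (fun p => !(p.1 == I + 1))).map
            (fun p => if p.1 == I then (I, pvCombineCell x y) else p)).filter
              (fun p => decide (I + 1 < p.1))
          = r.items.filter (fun p => decide (I + 1 < p.1)) := by
        rw [List.filter_map]
        rw [show (((fun p : Int × String × Int => decide (I + 1 < p.1)) ∘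
              (fun p => if p.1 == I then (I, pvCombineCell x y) else p))
            = fun p : Int × String × Int => decide (I + 1 < p.1)) from ?_, pv_filter_gt_of_ne]
        · have := List.map_congr_left
            (l := r.items.filter (fun p => decide (I + 1 < p.1)))
            (f := fun p : Int × String × Int => if p.1 == I then (I, pvCombineCell x y) else p)
            (g := id) ?_
          · simpa using this
          · intro p hp
            have : I + 1 < p.1 := by simpa using (List.mem_filter.mp hp).2
            have hne : ¬ (p.1 = I) := by omega
            simp [hne]
        · funext p
          simp only [Function.comp_apply, hkey p]
      rw [hfle, hfgt]
      have hndf : ((r.items.filter (fun p => decide (I + 1 < p.1))).map Prod.fst).Nodup :=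
        hnd.sublist (List.Sublist.map _ List.filter_sublist)
      simp only [pvMergedRowB, ← hI, ha, hb, Option.isSome_some, Option.isNone_some,
        Bool.false_and, if_false, Option.getD_some]
      have hmaps : (r.items.filter (fun p => decide (p.1 ≤ I))).map
            (fun p => if p.1 = I then (I, pvCombineCell x y) else p)
          = (r.items.filter (fun p => decide (p.1 ≤ I))).map
              (fun p => if p.1 == I then (I, pvCombineCell x y) else p) := by
        apply List.map_congr_left
        intro p _
        by_cases h : p.1 = I <;> simp [h]
      rw [if_neg (by simp), hmaps, pv_sorted_dec _ hndf]
      have hndparts : (((r.items.filter (fun p => decide (p.1 ≤ I))).map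
            (fun p => if p.1 == I then (I, pvCombineCell x y) else p) ++
          ((PySem.List.sorted (r.items.filter (fun p => decide (I + 1 < p.1)))
            (fun p => p.1)).map (fun p : Int × String × Int => (p.1 - 1, p.2)))).map Prod.fst).Nodup := by
        have heq : (((r.items.filter (fun p => decide (p.1 ≤ I))).map
              (fun p => if p.1 == I then (I, pvCombineCell x y) else p) ++
            ((PySem.List.sorted (r.items.filter (fun p => decide (I + 1 < p.1)))
              (fun p => p.1)).map (fun p : Int × String × Int => (p.1 - 1, p.2)))).map Prod.fst)
            = ((r.items.filter (fun p => decide (p.1 ≤ I)) ++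
            ((PySem.List.sorted (r.items.filter (fun p => decide (I + 1 < p.1)))
              (fun p => p.1)).map (fun p : Int × String × Int => (p.1 - 1, p.2)))).map Prod.fst) := by
          simp only [List.map_append, List.map_map]
          congr 1
          exact List.map_congr_left (fun p _ => hkey p)
        rw [heq]
        exact pv_parts_nodup i r hnd
      rw [pv_mk_eq_ofList _ hndparts]

-- one unfolding per branch of A's while loop
theorem pvLoopA_eq_merge {md : Int} {c : List Int} {rows : List PvRow} {i : Nat}
    (h : i + 1 < c.length) (hdist : c.getD (i+1) 0 - c.getD i 0 ≤ md)
    (hcrit : 1 ≤ (rows.foldl (fun (p : Int × Int) r =>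
        let hi := r.contains (i : Int)
        let hj := r.contains ((i : Int) + 1)
        if hj && hi then (p.1 + 1, p.2)
        else if hj && !hi then (p.1, p.2 + 1)
        else p) (0, 0)).1 ∧
      (rows.foldl (fun (p : Int × Int) r =>
        let hi := r.contains (i : Int)
        let hj := r.contains ((i : Int) + 1)
        if hj && hi then (p.1 + 1, p.2)
        else if hj && !hi then (p.1, p.2 + 1)
        else p) (0, 0)).2 ≤ max 1 (pvIntOfPointTwo ((rows.foldl (fun (p : Int × Int) r =>
        let hi := r.contains (i : Int)
        let hj := r.contains ((i : Int) + 1)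
        if hj && hi then (p.1 + 1, p.2)
        else if hj && !hi then (p.1, p.2 + 1)
        else p) (0, 0)).1 + (rows.foldl (fun (p : Int × Int) r =>
        let hi := r.contains (i : Int)
        let hj := r.contains ((i : Int) + 1)
        if hj && hi then (p.1 + 1, p.2)
        else if hj && !hi then (p.1, p.2 + 1)
        else p) (0, 0)).2))) :
    pvLoopA md c rows i
      = pvLoopA md (c.eraseIdx (i+1)) ((rows.map (pvMergeRowA i)).map (pvRenumRowA i)) i := by
  conv_lhs => rw [pvLoopA.eq_def]
  rw [dif_pos h, if_pos hdist]
  exact if_pos hcrit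

theorem pvLoopA_eq_skip_crit {md : Int} {c : List Int} {rows : List PvRow} {i : Nat}
    (h : i + 1 < c.length) (hdist : c.getD (i+1) 0 - c.getD i 0 ≤ md)
    (hcrit : ¬ (1 ≤ (rows.foldl (fun (p : Int × Int) r =>
        let hi := r.contains (i : Int)
        let hj := r.contains ((i : Int) + 1)
        if hj && hi then (p.1 + 1, p.2)
        else if hj && !hi then (p.1, p.2 + 1)
        else p) (0, 0)).1 ∧
      (rows.foldl (fun (p : Int × Int) r =>
        let hi := r.contains (i : Int)
        let hj := r.contains ((i : Int) + 1)
        if hj && hi then (p.1 + 1, p.2)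
        else if hj && !hi then (p.1, p.2 + 1)
        else p) (0, 0)).2 ≤ max 1 (pvIntOfPointTwo ((rows.foldl (fun (p : Int × Int) r =>
        let hi := r.contains (i : Int)
        let hj := r.contains ((i : Int) + 1)
        if hj && hi then (p.1 + 1, p.2)
        else if hj && !hi then (p.1, p.2 + 1)
        else p) (0, 0)).1 + (rows.foldl (fun (p : Int × Int) r =>
        let hi := r.contains (i : Int)
        let hj := r.contains ((i : Int) + 1)
        if hj && hi then (p.1 + 1, p.2)
        else if hj && !hi then (p.1, p.2 + 1)
        else p) (0, 0)).2)))) :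
    pvLoopA md c rows i = pvLoopA md c rows (i+1) := by
  conv_lhs => rw [pvLoopA.eq_def]
  rw [dif_pos h, if_pos hdist]
  exact if_neg hcrit

theorem pvLoopA_eq_skip_dist {md : Int} {c : List Int} {rows : List PvRow} {i : Nat}
    (h : i + 1 < c.length) (hdist : ¬ c.getD (i+1) 0 - c.getD i 0 ≤ md) :
    pvLoopA md c rows i = pvLoopA md c rows (i+1) := by
  conv_lhs => rw [pvLoopA.eq_def]
  rw [dif_pos h, if_neg hdist]

theorem pvLoopA_eq_stop {md : Int} {c : List Int} {rows : List PvRow} {i : Nat}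
    (h : ¬ i + 1 < c.length) : pvLoopA md c rows i = (c, rows) := by
  rw [pvLoopA.eq_def, dif_neg h]

-- evaluating one phase-1 step of B
theorem pvStepB_merge (md : Int) (ks : List (List Int)) (G : List Int) (E : List Nat)
    (cf : Int) (has : List Bool) (j c : Int) (hd : c - cf ≤ md)
    (hcrit : 1 ≤ pvBothCount has ks j ∧
      pvAloneCount has ks j ≤ max 1 (pvDiv5 (pvBothCount has ks j + pvAloneCount has ks j))) :
    pvStepB md ks (G, E, some cf, has) (j, c)
      = (G, E ++ [G.length], some cf, List.zipWith (fun h k => h || k.contains j) has ks) := by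
  simp only [pvStepB]
  rw [if_pos hd, if_pos hcrit]

theorem pvStepB_push_dist (md : Int) (ks : List (List Int)) (G : List Int) (E : List Nat)
    (cf : Int) (has : List Bool) (j c : Int) (hd : ¬ c - cf ≤ md) :
    pvStepB md ks (G, E, some cf, has) (j, c)
      = (G ++ [cf], E, some c, ks.map (fun k => k.contains j)) := by
  simp only [pvStepB]
  rw [if_neg hd]

theorem pvStepB_push_crit (md : Int) (ks : List (List Int)) (G : List Int) (E : List Nat)
    (cf : Int) (has : List Bool) (j c : Int) (hd : c - cf ≤ md)
    (hcrit : ¬ (1 ≤ pvBothCount has ks j ∧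
      pvAloneCount has ks j ≤ max 1 (pvDiv5 (pvBothCount has ks j + pvAloneCount has ks j)))) :
    pvStepB md ks (G, E, some cf, has) (j, c)
      = (G ++ [cf], E, some c, ks.map (fun k => k.contains j)) := by
  simp only [pvStepB]
  rw [if_pos hd, if_neg hcrit]

-- final assembly of B from a phase-1 state (proof-side view of B's last lines)
def pvFinish (rows0 : List PvRow) (st : List Int × List Nat × Option Int × List Bool) :
    List Int × List PvRow :=
  (st.1 ++ (match st.2.2.1 with | some cf => [cf] | none => []),
   rows0.map (pvApplyEvents st.2.1))

-- the simulation: A's while loop against B's phase-1 fold resumed mid-way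
theorem pv_sim (md : Int) (centers0 : List Int) (rows0 : List PvRow)
    (hnod : ∀ r ∈ rows0, r.keys.Nodup) :
    ∀ (fuel i : Nat) (G : List Int) (cf : Int) (E : List Nat) (has : List Bool),
      centers0.length - (i + 1 + E.length) ≤ fuel →
      G.length = i →
      (∀ (r : PvRow) (kk : Int), (i : Int) < kk →
        (pvApplyEvents E r).contains kk = r.contains (kk + (E.length : Int))) →
      has = rows0.map (fun r => (pvApplyEvents E r).contains (i : Int)) →
      pvLoopA md (G ++ cf :: centers0.drop (i + 1 + E.length)) (rows0.map (pvApplyEvents E)) i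
        = pvFinish rows0
            (((PySem.List.enumerate centers0).drop (i + 1 + E.length)).foldl
              (pvStepB md (rows0.map PySem.Dict.keys)) (G, E, some cf, has)) := by
  intro fuel
  induction fuel with
  | zero =>
    intro i G cf E has hf hG htail hhas
    have hge : centers0.length ≤ i + 1 + E.length := by omega
    rw [List.drop_eq_nil_of_le hge,
      List.drop_eq_nil_of_le (by rw [PySem.List.length_enumerate]; exact hge)]
    rw [pvLoopA_eq_stop (by simp [hG])]
    simp [pvFinish]
  | succ fuel ih =>
    intro i G cf E has hf hG htail hhas
    by_cases hlt : i + 1 + E.length < centers0.length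
    case neg =>
      have hge : centers0.length ≤ i + 1 + E.length := by omega
      rw [List.drop_eq_nil_of_le hge,
        List.drop_eq_nil_of_le (by rw [PySem.List.length_enumerate]; exact hge)]
      rw [pvLoopA_eq_stop (by simp [hG])]
      simp [pvFinish]
    case pos =>
      subst hG
      have hltE : G.length + 1 + E.length < (PySem.List.enumerate centers0).length := by
        rw [PySem.List.length_enumerate]; exact hlt
      have hdc := List.drop_eq_getElem_cons (l := centers0) hlt
      have hde := List.drop_eq_getElem_cons (l := PySem.List.enumerate centers0) hltE
      rw [PySem.List.getElem_enumerate] at hde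
      simp only [zero_add] at hde
      set cn := centers0[G.length + 1 + E.length]'hlt with hcn
      set jI : Int := ((G.length + 1 + E.length : Nat) : Int) with hjI
      rw [hdc, hde, List.foldl_cons]
      -- the candidate's original key seen through the events applied so far
      have hji : jI = ((G.length : Int) + 1) + (E.length : Int) := by
        rw [hjI]; push_cast; ring
      have hkeyj : ∀ r : PvRow, (r.keys.contains jI) = (pvApplyEvents E r).contains ((G.length : Int) + 1) := by
        intro r
        rw [pv_keys_contains, htail r ((G.length : Int) + 1) (by omega), hji]
      -- the push branch, shared by the two skip cases
      have hpush : pvLoopA md (G ++ cf :: cn :: centers0.drop (G.length + 1 + E.length + 1))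
            (rows0.map (pvApplyEvents E)) (G.length + 1)
          = pvFinish rows0 (((PySem.List.enumerate centers0).drop (G.length + 1 + E.length + 1)).foldl
              (pvStepB md (rows0.map PySem.Dict.keys))
              (G ++ [cf], E, some cn, (rows0.map PySem.Dict.keys).map (fun ks => ks.contains jI))) := by
        have hidx : (G.length + 1) + 1 + E.length = G.length + 1 + E.length + 1 := by omega
        have h4 : (rows0.map PySem.Dict.keys).map (fun ks => ks.contains jI)
            = rows0.map (fun r => (pvApplyEvents E r).contains ((G.length + 1 : Nat) : Int)) := by
          rw [List.map_map]
          apply List.map_congr_left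
          intro r _
          show r.keys.contains jI = _
          rw [hkeyj r, show ((G.length + 1 : Nat) : Int) = (G.length : Int) + 1 from by push_cast; ring]
        have := ih (G.length + 1) (G ++ [cf]) cn E
            ((rows0.map PySem.Dict.keys).map (fun ks => ks.contains jI))
            (by simpa [hidx] using (by omega : centers0.length - (G.length + 1 + E.length + 1) ≤ fuel))
            (by simp)
            (fun r kk hk => htail r kk (by push_cast at hk ⊢; omega))
            h4
        rw [hidx] at this
        simpa only [List.append_assoc, List.singleton_append] using this
      by_cases hd : cn - cf ≤ md
      case neg =>
        rw [pvLoopA_eq_skip_dist (i := G.length)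
            (by simp)
            (by rw [pv_getD_at1, pv_getD_at]; exact hd)]
        rw [pvStepB_push_dist md _ G E cf has jI cn hd]
        exact hpush
      case pos =>
        -- translate B's zip counts into A's filter/countP counts
        have hzip : has.zip (rows0.map PySem.Dict.keys)
            = rows0.map (fun r => ((pvApplyEvents E r).contains ((G.length : Nat) : Int), r.keys)) := by
          rw [hhas, List.zip_map']
        have hbB : pvBothCount has (rows0.map PySem.Dict.keys) jI
            = (((rows0.map (pvApplyEvents E)).filter
                  (fun r => r.contains (((G.length : Nat) : Int) + 1))).countP
                (fun r => r.contains ((G.length : Nat) : Int)) : Int) := by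
          unfold pvBothCount
          rw [hzip, List.countP_map, List.countP_filter, List.countP_map]
          simp only [Function.comp_def]
          congr 1
          apply List.countP_congr
          intro r _
          rw [hkeyj r]
        have hlenF : ((rows0.map (pvApplyEvents E)).filter
              (fun r => r.contains (((G.length : Nat) : Int) + 1))).length
            = rows0.countP (fun r => (pvApplyEvents E r).contains (((G.length : Nat) : Int) + 1)) := by
          rw [← List.countP_eq_length_filter, List.countP_map]
          rfl
        have haB : pvAloneCount has (rows0.map PySem.Dict.keys) jI
            = ((((rows0.map (pvApplyEvents E)).filter
                  (fun r => r.contains (((G.length : Nat) : Int) + 1))).length : Int)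
              - (((rows0.map (pvApplyEvents E)).filter
                  (fun r => r.contains (((G.length : Nat) : Int) + 1))).countP
                  (fun r => r.contains ((G.length : Nat) : Int)) : Int)) := by
          unfold pvAloneCount
          rw [hzip, List.countP_map]
          simp only [Function.comp_def]
          have h1 : rows0.countP (fun r =>
              !(pvApplyEvents E r).contains ((G.length : Nat) : Int)
                && r.keys.contains jI)
              = rows0.countP (fun r =>
                !(pvApplyEvents E r).contains ((G.length : Nat) : Int)
                  && (pvApplyEvents E r).contains (((G.length : Nat) : Int) + 1)) := by
            apply List.countP_congr
            intro r _
            rw [hkeyj r]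
          have h2 : ((rows0.map (pvApplyEvents E)).filter
                (fun r => r.contains (((G.length : Nat) : Int) + 1))).countP
                (fun r => r.contains ((G.length : Nat) : Int))
              = rows0.countP (fun r =>
                (pvApplyEvents E r).contains ((G.length : Nat) : Int)
                  && (pvApplyEvents E r).contains (((G.length : Nat) : Int) + 1)) := by
            rw [List.countP_filter, List.countP_map]
            simp only [Function.comp_def]
          have h3 := pv_countP_split
            (fun r => (pvApplyEvents E r).contains ((G.length : Nat) : Int))
            (fun r => (pvApplyEvents E r).contains (((G.length : Nat) : Int) + 1)) rows0
          rw [h1, hlenF, h2]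
          push_cast
          omega
        have hcount := pv_count_loop G.length (rows0.map (pvApplyEvents E)) 0 0
        by_cases hcrit : 1 ≤ pvBothCount has (rows0.map PySem.Dict.keys) jI ∧
            pvAloneCount has (rows0.map PySem.Dict.keys) jI ≤
              max 1 (pvDiv5 (pvBothCount has (rows0.map PySem.Dict.keys) jI
                + pvAloneCount has (rows0.map PySem.Dict.keys) jI))
        case pos =>
          -- merge on both sides
          rw [pvStepB_merge md _ G E cf has jI cn hd hcrit]
          rw [pvLoopA_eq_merge (i := G.length)
              (by simp)
              (by rw [pv_getD_at1, pv_getD_at]; exact hd)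
              (by rw [hcount]; simp only [zero_add]; rw [← haB, ← hbB]; exact hcrit)]
          rw [pv_eraseIdx_mid]
          have hrows : ((rows0.map (pvApplyEvents E)).map (pvMergeRowA G.length)).map
                (pvRenumRowA G.length)
              = rows0.map (pvApplyEvents (E ++ [G.length])) := by
            rw [List.map_map, List.map_map]
            apply List.map_congr_left
            intro r hr
            show pvRenumRowA G.length (pvMergeRowA G.length (pvApplyEvents E r)) = _
            rw [pvApplyEvents_append]
            exact pv_row_step G.length (pvApplyEvents E r) (pvApplyEvents_nodup E r (hnod r hr))
          rw [hrows]
          have hidx2 : G.length + 1 + (E ++ [G.length]).length = G.length + 1 + E.length + 1 := by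
            simp only [List.length_append, List.length_cons, List.length_nil]
            omega
          have htail' : ∀ (r : PvRow) (kk : Int), (G.length : Int) < kk →
              (pvApplyEvents (E ++ [G.length]) r).contains kk
                = r.contains (kk + ((E ++ [G.length]).length : Int)) := by
            intro r kk hk
            rw [pvApplyEvents_append, pv_containsB]
            rw [if_neg (by omega), if_neg (by omega)]
            rw [htail r (kk + 1) (by omega)]
            congr 1
            simp
            ring
          have hhas' : List.zipWith (fun h ks => h || ks.contains jI) has (rows0.map PySem.Dict.keys)
              = rows0.map (fun r => (pvApplyEvents (E ++ [G.length]) r).contains ((G.length : Nat) : Int)) := by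
            rw [hhas, List.zipWith_map, pv_zipWith_self]
            apply List.map_congr_left
            intro r _
            rw [pvApplyEvents_append, pv_containsB]
            rw [if_neg (by omega), if_pos rfl]
            rw [hkeyj r]
          have := ih G.length G cf (E ++ [G.length])
              (List.zipWith (fun h ks => h || ks.contains jI) has (rows0.map PySem.Dict.keys))
              (by rw [hidx2]; omega)
              rfl
              htail'
              hhas'
          rw [hidx2] at this
          exact this
        case neg =>
          rw [pvStepB_push_crit md _ G E cf has jI cn hd hcrit]
          rw [pvLoopA_eq_skip_crit (i := G.length)
              (by simp)
              (by rw [pv_getD_at1, pv_getD_at]; exact hd)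
              (by rw [hcount]; simp only [zero_add]; rw [← haB, ← hbB]; exact hcrit)]
          exact hpush

-- ===== VERDICT (by name: the statement is the Claim_ definition above) =====
theorem merge_close_columns_py_spec : Claim_equal_merge_close_columns_py := by
  intro centers row_cells merge_dist _
  unfold Spec_merge_close_columns_py
  show merge_close_columns_py centers row_cells merge_dist
      = merge_close_columns_py_alt centers row_cells merge_dist
  simp only [merge_close_columns_py, merge_close_columns_py_alt]
  have hnod : ∀ r ∈ row_cells.map (PySem.Dict.ofList (κ := Int) (ν := String × Int)),
      r.keys.Nodup := by
    intro r hr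
    obtain ⟨l, -, rfl⟩ := List.mem_map.mp hr
    exact PySem.Dict.nodup_keys_ofList l
  cases centers with
  | nil =>
    rw [pvLoopA_eq_stop (by simp)]
    simp [PySem.List.enumerate_nil, pvApplyEvents]
  | cons c0 rest =>
    have hstep1 : pvStepB merge_dist ((row_cells.map PySem.Dict.ofList).map PySem.Dict.keys)
        ([], [], none, row_cells.map (fun _ => false)) ((0 : Int), c0)
        = ([], [], some c0,
           ((row_cells.map PySem.Dict.ofList).map PySem.Dict.keys).map
             (fun ks => ks.contains (0 : Int))) := by
      simp only [pvStepB]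
    have hhas0 : ((row_cells.map PySem.Dict.ofList).map PySem.Dict.keys).map
          (fun ks => ks.contains (0 : Int))
        = (row_cells.map PySem.Dict.ofList).map
            (fun r => (pvApplyEvents [] r).contains ((0 : Nat) : Int)) := by
      rw [List.map_map]
      apply List.map_congr_left
      intro r _
      show r.keys.contains (0 : Int) = _
      rw [pv_keys_contains]
      simp [pvApplyEvents]
    have hsim := pv_sim merge_dist (c0 :: rest) (row_cells.map PySem.Dict.ofList) hnod
        (c0 :: rest).length 0 [] c0 []
        (((row_cells.map PySem.Dict.ofList).map PySem.Dict.keys).map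
          (fun ks => ks.contains (0 : Int)))
        (by simp)
        rfl
        (by intro r kk _; simp [pvApplyEvents])
        hhas0
    have hid : pvApplyEvents [] = id := funext fun r => rfl
    simp only [List.length_nil, Nat.add_zero, Nat.zero_add, List.nil_append,
      PySem.List.enumerate_cons, List.drop_succ_cons, List.drop_zero, zero_add,
      hid, List.map_id] at hsim
    rw [PySem.List.enumerate_cons, List.foldl_cons, hstep1]
    simp only [zero_add]
    rw [hsim]
    simp [pvFinish, List.map_map]
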